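-- pv_equiv track=rewrite | github.com/Aamir7693/Opti-Q | old/main.py | is_valid_dag
-- ===== SOURCE A (Python) =====
-- def is_valid_dag(k, mask):
--     """
--     Check if a bitmask represents a valid DAG:
--     - Single sink (only highest node has out-degree 0)
--     - Fully connected (all nodes reach sink)
--
--     Returns: True if valid, False otherwise
--     """
--     if k > 1 and mask == 0:
--         return False  # Empty graph
--
--     # Reconstruct adjacency matrix from bitmask
--     adj = [[0] * k for _ in range(k)]
--     bit_index = 0
--     for i in range(k - 1):
--         for j in range(i + 1, k):
--             if mask & (1 << bit_index):
--                 adj[i][j] = 1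
--             bit_index += 1
--
--     # Check one-sink condition
--     outdeg = [0] * k
--     for i in range(k):
--         for j in range(k):
--             if adj[i][j] == 1:
--                 outdeg[i] += 1
--
--     # Only highest node should have out-degree 0
--     if any(outdeg[node] == 0 for node in range(k - 1)):
--         return False
--
--     # Check full connectivity (every node can reach the sink)
--     reachable = [False] * k
--     reachable[-1] = True  # mark sink
--     # BFS backward from sink
--     queue = [k - 1]
--     while queue:
--         cur = queue.pop(0)
--         for prev in range(cur):
--             if adj[prev][cur] == 1 and not reachable[prev]:
--                 reachable[prev] = True
--                 queue.append(prev)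
--
--     return all(reachable)
-- ===== SOURCE B (Python) =====
-- def is_valid_dag(k, mask):
--     """Reverse-topological DP re-implementation: no adjacency matrix, no BFS queue.
--
--     Edge (i,j) is read directly from the bitmask via the closed-form bit index;
--     reachability to the sink is computed in one fixed reverse pass.
--     """
--     if k > 1 and mask == 0:
--         return False  # Empty graph
--
--     def has_edge(i, j):
--         # bit index of pair (i, j), i < j: bits before row i plus offset in row i
--         b = i * (k - 1) - i * (i - 1) // 2 + (j - i - 1)
--         return (mask >> b) & 1 == 1
--
--     # one-sink condition: every node below the top has at least one outgoing edge
--     if any(not any(has_edge(i, j) for j in range(i + 1, k)) for i in range(k - 1)):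
--         return False
--
--     # reverse-topological reachability DP
--     reach = [False] * k
--     reach[-1] = True  # mark sink (IndexError when k <= 0, as in the original)
--     for i in range(k - 2, -1, -1):
--         reach[i] = any(has_edge(i, j) and reach[j] for j in range(i + 1, k))
--     return all(reach)
-- ===== Notes on version B (the rewrite author's own statement) =====
-- stated objective: faster
-- what changed: B drops the adjacency-matrix reconstruction, the out-degree table and the backward BFS queue: edges are read straight from the bitmask via a closed-form bit index, the single-sink check becomes a short-circuiting any/any scan, and reachability to the sink is computed by a reverse-topological-order DP over a boolean array instead of a BFS frontier.
import Mathlib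
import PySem

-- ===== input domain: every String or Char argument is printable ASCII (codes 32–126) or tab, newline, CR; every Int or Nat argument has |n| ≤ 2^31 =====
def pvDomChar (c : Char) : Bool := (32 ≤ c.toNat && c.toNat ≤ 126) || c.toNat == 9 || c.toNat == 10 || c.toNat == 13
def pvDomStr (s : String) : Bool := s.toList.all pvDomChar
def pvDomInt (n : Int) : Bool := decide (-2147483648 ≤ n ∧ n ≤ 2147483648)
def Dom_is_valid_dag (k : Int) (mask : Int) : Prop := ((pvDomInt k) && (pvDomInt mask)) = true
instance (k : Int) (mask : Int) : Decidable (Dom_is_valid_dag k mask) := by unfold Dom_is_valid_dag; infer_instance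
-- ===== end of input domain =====

-- B replaces A's adjacency-matrix + out-degree table + backward BFS queue by direct
-- bit tests (closed-form bit index), a short-circuiting single-sink scan and a
-- reverse-topological reachability DP (objective: faster, measured).

-- ===== PORT A =====

-- truthiness of Python `m & (1 << b)` (equivalently `(m >> b) & 1 == 1`); exact for
-- negative m as well: Python ints are two's complement, bit b of m is floor(m/2^b) mod 2.
def pvBit (m : Int) (b : Nat) : Bool := PySem.Int.mod (PySem.Int.floordiv m ((2:Int)^b)) 2 == 1

-- the `while queue:` loop of A; fuel-bounded recursion (fuel kn*kn never runs out for
-- the initial state, see lemma pvBfs_run below), FIFO queue popped at the head,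
-- appended at the tail, exactly as A's `queue.pop(0)` / `queue.append(prev)`.
def pvBfsA (adj : List (List Int)) (fuel : Nat) (r : List Bool) (q : List Nat) : List Bool :=
  match fuel, q with
  | _, [] => r
  | 0, _ :: _ => r
  | fuel+1, cur :: q' =>
      let st := (List.range cur).foldl
        (fun (st : List Bool × List Nat) prev =>
          if ((adj.getD prev []).getD cur 0 == 1) && !(st.1.getD prev false)
          then (st.1.set prev true, st.2 ++ [prev]) else st) (r, q')
      pvBfsA adj fuel st.1 st.2

def is_valid_dag (k : Int) (mask : Int) : Bool :=
  if k > 1 ∧ mask = 0 then false      -- Empty graph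
  else if k ≤ 0 then false            -- totality guard: Python raises IndexError (`reachable[-1]` on []) here; outside Pre_
  else
    let kn := k.toNat
    -- reconstruct adjacency matrix from the bitmask, running bit_index
    let adjb := (List.range (kn-1)).foldl
      (fun (st : List (List Int) × Nat) i =>
        (List.range' (i+1) (kn-(i+1))).foldl
          (fun (st2 : List (List Int) × Nat) j =>
            ((if pvBit mask st2.2 then st2.1.set i ((st2.1.getD i []).set j 1) else st2.1), st2.2 + 1))
          st)
      (List.replicate kn (List.replicate kn (0:Int)), 0)
    let adj := adjb.1
    -- out-degree table
    let outdeg := (List.range kn).foldl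
      (fun od i => (List.range kn).foldl
        (fun (od : List Int) j =>
          if (adj.getD i []).getD j 0 == 1 then od.set i (od.getD i 0 + 1) else od) od)
      (List.replicate kn (0:Int))
    if (List.range (kn-1)).any (fun node => outdeg.getD node 0 == 0) then false
    else
      -- reachable[-1] = True on a length-kn list is index kn-1 (kn ≥ 1 here)
      let r0 := (List.replicate kn false).set (kn-1) true
      (pvBfsA adj (kn*kn) r0 [kn-1]).all id

-- ===== PORT B =====

-- bit index of pair (i,j): b = i*(k-1) - i*(i-1)//2 + (j-i-1); the index is ≥ 0
-- whenever 0 ≤ i < j, so `.toNat` is exact there.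
def pvEdgeB (k : Int) (mask : Int) (i j : Nat) : Bool :=
  pvBit mask ((i:Int) * (k-1) - PySem.Int.floordiv ((i:Int) * ((i:Int)-1)) 2 + ((j:Int) - (i:Int) - 1)).toNat

def is_valid_dag_alt (k : Int) (mask : Int) : Bool :=
  if k > 1 ∧ mask = 0 then false      -- Empty graph
  else if k ≤ 0 then false            -- totality guard: Python raises IndexError (`reach[-1]` on []) here; outside Pre_
  else
    let kn := k.toNat
    -- one-sink condition: every node below the top has an outgoing edge
    if (List.range (kn-1)).any
        (fun i => !((List.range' (i+1) (kn-(i+1))).any (fun j => pvEdgeB k mask i j))) then false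
    else
      -- reverse-topological reachability DP
      let reach0 := (List.replicate kn false).set (kn-1) true
      let reach := ((List.range (kn-1)).reverse).foldl
        (fun (r : List Bool) i =>
          r.set i ((List.range' (i+1) (kn-(i+1))).any (fun j => pvEdgeB k mask i j && r.getD j false)))
        reach0
      reach.all id

-- ===== PRECONDITION & SPEC =====

-- Pre_ excludes k ≤ 0, on which both Pythons raise IndexError (`reachable[-1]` on an empty list).
def Pre_is_valid_dag (k : Int) (mask : Int) : Prop := 1 ≤ k
instance (k : Int) (mask : Int) : Decidable (Pre_is_valid_dag k mask) := by unfold Pre_is_valid_dag; infer_instance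
def pvWitness_is_valid_dag : Int × Int := (3, 7)

def Spec_is_valid_dag (k : Int) (mask : Int) (out : Bool) : Prop := out = is_valid_dag_alt k mask
instance (k : Int) (mask : Int) (out : Bool) : Decidable (Spec_is_valid_dag k mask out) := by unfold Spec_is_valid_dag; infer_instance

-- ===== CLAIM (what is proved, stated in full; the proofs are below) =====
def Claim_equal_is_valid_dag : Prop := ∀ (k : Int) (mask : Int), Dom_is_valid_dag k mask → Pre_is_valid_dag k mask → Spec_is_valid_dag k mask (is_valid_dag k mask)

-- ===== LEMMAS AND PROOFS =====

-- bit position where row i starts (Σ_{t<i} (kn-t-1))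
def pvS (kn : Nat) : Nat → Nat
  | 0 => 0
  | i+1 => pvS kn i + (kn - i - 1)

-- matrix entry as read by A
def pvEnt (a : List (List Int)) (p q : Nat) : Int := (a.getD p []).getD q 0

-- number of still-unmarked nodes (BFS termination measure component)
def pvCF (r : List Bool) : Nat := r.count false

lemma pvS_int (kn : Nat) : ∀ i : Nat, i ≤ kn → 2 * (pvS kn i : Int) = (i:Int) * (2*(kn:Int) - i - 1)
  | 0, _ => by simp [pvS]
  | i+1, h => by
    have ih := pvS_int kn i (by omega)
    have hc : ((kn - i - 1 : Nat) : Int) = (kn:Int) - i - 1 := by omega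
    unfold pvS
    push_cast
    rw [hc]
    linear_combination ih

-- the closed-form bit index of B equals row start + offset
lemma pvIdx_eq (k : Int) (kn i j : Nat) (hk : 1 ≤ k) (hkn : kn = k.toNat)
    (hij : i < j) (hj : j < kn) :
    ((i:Int) * (k-1) - PySem.Int.floordiv ((i:Int) * ((i:Int)-1)) 2 + ((j:Int) - (i:Int) - 1)).toNat
      = pvS kn i + (j - i - 1) := by
  have hk' : ((kn:Nat) : Int) = k := by omega
  set fd := PySem.Int.floordiv ((i:Int) * ((i:Int)-1)) 2 with hfddef
  have hdvd : (2:Int) ∣ (i:Int) * ((i:Int)-1) := by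
    have h := Int.even_mul_succ_self ((i:Int)-1)
    have h2 := h.two_dvd
    simpa [mul_comm, sub_add_cancel] using h2
  have hmod : PySem.Int.mod ((i:Int) * ((i:Int)-1)) 2 = 0 := by
    rw [PySem.Int.mod_eq_zero_iff_dvd]; exact hdvd
  have h_fd : fd * 2 = (i:Int) * ((i:Int)-1) := by
    have h := PySem.Int.floordiv_mul_add_mod ((i:Int) * ((i:Int)-1)) 2
    rw [hmod] at h; simpa [hfddef] using h
  have hS := pvS_int kn i (by omega)
  have key : (i:Int) * (k-1) - fd = (pvS kn i : Int) := by
    have h2xy : 2 * ((i:Int) * (k-1) - fd) = 2 * (pvS kn i : Int) := by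
      rw [← hk']
      linear_combination -h_fd - hS
    omega
  have hE : (i:Int) * (k-1) - fd + ((j:Int) - (i:Int) - 1)
      = ((pvS kn i + (j - i - 1) : Nat) : Int) := by
    have hcast : ((pvS kn i + (j - i - 1) : Nat) : Int) = (pvS kn i : Int) + ((j:Int) - i - 1) := by
      omega
    rw [hcast]; linear_combination key
  omega

lemma pvEdgeB_eq (k mask : Int) (kn i j : Nat) (hk : 1 ≤ k) (hkn : kn = k.toNat)
    (hij : i < j) (hj : j < kn) :
    pvEdgeB k mask i j = pvBit mask (pvS kn i + (j - i - 1)) := by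
  unfold pvEdgeB; rw [pvIdx_eq k kn i j hk hkn hij hj]


lemma pvGetD_set_self {α : Type} (l : List α) (i : Nat) (v d : α) (h : i < l.length) :
    (l.set i v).getD i d = v := by
  simp [List.getD_eq_getElem?_getD, List.getElem?_set_self, h]

lemma pvGetD_set_ne {α : Type} (l : List α) (i p : Nat) (v d : α) (h : p ≠ i) :
    (l.set i v).getD p d = l.getD p d := by
  simp [List.getD_eq_getElem?_getD, List.getElem?_set_ne (fun he => h he.symm)]

lemma pvAdjInner (mask : Int) (n i : Nat) :
    ∀ (c s b : Nat) (a : List (List Int)),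
    a.length = n → (∀ p, p < n → (a.getD p []).length = n) → i < n → s + c ≤ n →
    ((List.range' s c).foldl
        (fun (st2 : List (List Int) × Nat) j =>
          ((if pvBit mask st2.2 then st2.1.set i ((st2.1.getD i []).set j 1) else st2.1), st2.2 + 1))
        (a, b)).2 = b + c ∧
    ((List.range' s c).foldl
        (fun (st2 : List (List Int) × Nat) j =>
          ((if pvBit mask st2.2 then st2.1.set i ((st2.1.getD i []).set j 1) else st2.1), st2.2 + 1))
        (a, b)).1.length = n ∧
    (∀ p, p < n → ((((List.range' s c).foldl
        (fun (st2 : List (List Int) × Nat) j =>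
          ((if pvBit mask st2.2 then st2.1.set i ((st2.1.getD i []).set j 1) else st2.1), st2.2 + 1))
        (a, b)).1.getD p []).length = n)) ∧
    (∀ p q : Nat, pvEnt ((List.range' s c).foldl
        (fun (st2 : List (List Int) × Nat) j =>
          ((if pvBit mask st2.2 then st2.1.set i ((st2.1.getD i []).set j 1) else st2.1), st2.2 + 1))
        (a, b)).1 p q =
      if p = i ∧ s ≤ q ∧ q < s + c ∧ pvBit mask (b + (q - s)) = true then 1 else pvEnt a p q) := by
  intro c
  induction c with
  | zero =>
      intro s b a ha hrow hi hsc
      refine ⟨rfl, ha, hrow, ?_⟩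
      intro p q
      split_ifs with h
      · omega
      · rfl
  | succ c ih =>
      intro s b a ha hrow hi hsc
      rw [List.range'_succ, List.foldl_cons]
      dsimp only
      set a1 : List (List Int) := if pvBit mask b then a.set i ((a.getD i []).set s 1) else a with ha1
      have ha1len : a1.length = n := by
        rw [ha1]; split_ifs <;> simp [ha]
      have ha1row : ∀ p, p < n → (a1.getD p []).length = n := by
        intro p hp
        rw [ha1]; split_ifs with hb
        · by_cases hpi : p = i
          · rw [hpi, pvGetD_set_self _ _ _ _ (by omega), List.length_set]
            exact hrow i hi
          · rw [pvGetD_set_ne _ _ _ _ _ hpi]; exact hrow p hp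
        · exact hrow p hp
      have hEnt1 : ∀ p q : Nat, pvEnt a1 p q =
          if p = i ∧ q = s ∧ pvBit mask b = true then 1 else pvEnt a p q := by
        intro p q
        by_cases hpi : p = i
        · by_cases hqs : q = s
          · by_cases hb : pvBit mask b = true
            · rw [if_pos ⟨hpi, hqs, hb⟩, ha1, if_pos hb]
              unfold pvEnt
              rw [hpi, hqs]
              rw [pvGetD_set_self _ _ _ _ (by omega)]
              rw [pvGetD_set_self _ _ _ _ (by rw [hrow i hi]; omega)]
            · rw [if_neg (by tauto), ha1, if_neg hb]
          · rw [if_neg (by tauto), ha1]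
            split_ifs with hb
            · unfold pvEnt
              rw [hpi, pvGetD_set_self _ _ _ _ (by omega), pvGetD_set_ne _ _ _ _ _ hqs]
            · rfl
        · rw [if_neg (by tauto), ha1]
          split_ifs with hb
          · unfold pvEnt
            rw [pvGetD_set_ne _ _ _ _ _ hpi]
          · rfl
      obtain ⟨h2, hlen, hrow', hent⟩ := ih (s+1) (b+1) a1 ha1len ha1row hi (by omega)
      refine ⟨by rw [h2]; omega, hlen, hrow', ?_⟩
      intro p q
      rw [hent p q, hEnt1 p q]
      by_cases hpi : p = i
      · by_cases hqs : q = s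
        · have e1 : ¬(p = i ∧ s + 1 ≤ q ∧ q < s + 1 + c ∧ pvBit mask (b + 1 + (q - (s+1))) = true) :=
            fun h => absurd h.2.1 (by omega)
          rw [if_neg e1]
          have e2 : b + (q - s) = b := by omega
          rw [e2]
          by_cases hb : pvBit mask b = true
          · rw [if_pos ⟨hpi, hqs, hb⟩, if_pos ⟨hpi, by omega, by omega, hb⟩]
          · rw [if_neg (by tauto), if_neg (by tauto)]
        · have e1 : (p = i ∧ s + 1 ≤ q ∧ q < s + 1 + c ∧ pvBit mask (b + 1 + (q - (s+1))) = true)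
              ↔ (p = i ∧ s ≤ q ∧ q < s + (c+1) ∧ pvBit mask (b + (q - s)) = true) := by
            constructor
            · rintro ⟨h1, h2, h3, h4⟩
              exact ⟨h1, by omega, by omega, by
                rw [show b + (q - s) = b + 1 + (q - (s+1)) from by omega]; exact h4⟩
            · rintro ⟨h1, h2, h3, h4⟩
              exact ⟨h1, by omega, by omega, by
                rw [show b + 1 + (q - (s+1)) = b + (q - s) from by omega]; exact h4⟩
          by_cases hLc : p = i ∧ s + 1 ≤ q ∧ q < s + 1 + c ∧ pvBit mask (b + 1 + (q - (s+1))) = true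
          · rw [if_pos hLc, if_pos (e1.mp hLc)]
          · rw [if_neg hLc, if_neg (fun h => hqs h.2.1), if_neg (fun h => hLc (e1.mpr h))]
      · rw [if_neg (by tauto), if_neg (by tauto), if_neg (by tauto)]

lemma pvAdjOuter (mask : Int) (n : Nat) :
    ∀ (c r : Nat) (a : List (List Int)),
    a.length = n → (∀ p, p < n → (a.getD p []).length = n) → r + c ≤ n - 1 → 1 ≤ n →
    (∀ p q : Nat, pvEnt ((List.range' r c).foldl
        (fun (st : List (List Int) × Nat) i =>
          (List.range' (i+1) (n-(i+1))).foldl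
            (fun (st2 : List (List Int) × Nat) j =>
              ((if pvBit mask st2.2 then st2.1.set i ((st2.1.getD i []).set j 1) else st2.1), st2.2 + 1))
            st)
        (a, pvS n r)).1 p q =
      if r ≤ p ∧ p < r + c ∧ p < q ∧ q < n ∧ pvBit mask (pvS n p + (q - p - 1)) = true then 1
      else pvEnt a p q) := by
  intro c
  induction c with
  | zero =>
      intro r a ha hrow hrc hn p q
      rw [if_neg (by omega), List.range'_zero, List.foldl_nil]
  | succ c ih =>
      intro r a ha hrow hrc hn p q
      rw [List.range'_succ, List.foldl_cons]
      obtain ⟨h2, hlen, hrow1, hent1⟩ :=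
        pvAdjInner mask n r (n - (r+1)) (r+1) (pvS n r) a ha hrow (by omega) (by omega)
      -- rewrite the inner-fold state as a pair with known second component pvS n (r+1)
      have hpair : ((List.range' (r+1) (n-(r+1))).foldl
            (fun (st2 : List (List Int) × Nat) j =>
              ((if pvBit mask st2.2 then st2.1.set r ((st2.1.getD r []).set j 1) else st2.1), st2.2 + 1))
            (a, pvS n r))
          = (((List.range' (r+1) (n-(r+1))).foldl
            (fun (st2 : List (List Int) × Nat) j =>
              ((if pvBit mask st2.2 then st2.1.set r ((st2.1.getD r []).set j 1) else st2.1), st2.2 + 1))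
            (a, pvS n r)).1, pvS n (r+1)) := by
        rw [Prod.ext_iff]
        refine ⟨rfl, ?_⟩
        rw [h2]
        have hd : pvS n (r + 1) = pvS n r + (n - r - 1) := rfl
        rw [hd]
        omega
      rw [hpair]
      set a1 := ((List.range' (r+1) (n-(r+1))).foldl
            (fun (st2 : List (List Int) × Nat) j =>
              ((if pvBit mask st2.2 then st2.1.set r ((st2.1.getD r []).set j 1) else st2.1), st2.2 + 1))
            (a, pvS n r)).1 with ha1
      have hih := ih (r+1) a1 hlen hrow1 (by omega) hn p q
      rw [hih]
      have hEnt1 : pvEnt a1 p q =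
          if p = r ∧ r < q ∧ q < n ∧ pvBit mask (pvS n r + (q - r - 1)) = true then 1
          else pvEnt a p q := by
        rw [hent1 p q]
        by_cases hc : p = r ∧ r + 1 ≤ q ∧ q < r + 1 + (n - (r+1)) ∧ pvBit mask (pvS n r + (q - (r+1))) = true
        · rw [if_pos hc]
          obtain ⟨e1, e2, e3, e4⟩ := hc
          rw [if_pos ⟨e1, by omega, by omega, by
            rw [show pvS n r + (q - r - 1) = pvS n r + (q - (r+1)) from by omega]; exact e4⟩]
        · rw [if_neg hc]
          rw [if_neg (fun h => hc ⟨h.1, by omega, by omega, by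
            rw [show pvS n r + (q - (r+1)) = pvS n r + (q - r - 1) from by omega]; exact h.2.2.2⟩)]
      rw [hEnt1]
      by_cases hpr : p = r
      · subst hpr
        rw [if_neg (fun h => absurd h.1 (by omega))]
        by_cases hc : p < q ∧ q < n ∧ pvBit mask (pvS n p + (q - p - 1)) = true
        · rw [if_pos ⟨rfl, hc.1, hc.2.1, hc.2.2⟩,
            if_pos ⟨by omega, by omega, hc.1, hc.2.1, hc.2.2⟩]
        · rw [if_neg (fun h => hc ⟨h.2.1, h.2.2.1, h.2.2.2⟩),
            if_neg (fun h => hc ⟨h.2.2.1, h.2.2.2.1, h.2.2.2.2⟩)]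
      · by_cases hc : r + 1 ≤ p ∧ p < r + 1 + c ∧ p < q ∧ q < n ∧ pvBit mask (pvS n p + (q - p - 1)) = true
        · rw [if_pos hc, if_pos ⟨by have := hc.1; omega, by have := hc.2.1; omega,
            hc.2.2.1, hc.2.2.2.1, hc.2.2.2.2⟩]
        · rw [if_neg hc, if_neg (fun h => hpr h.1),
            if_neg (fun h => hc ⟨by have := h.1; omega, by have := h.2.1; omega,
              h.2.2.1, h.2.2.2.1, h.2.2.2.2⟩)]

lemma pvGetD_replicate {α : Type} (n p : Nat) (v d : α) :
    (List.replicate n v).getD p d = if p < n then v else d := by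
  rw [List.getD_eq_getElem?_getD, List.getElem?_replicate]
  split_ifs <;> rfl

lemma pvEnt_init (n p q : Nat) : pvEnt (List.replicate n (List.replicate n (0:Int))) p q = 0 := by
  unfold pvEnt
  rw [pvGetD_replicate]
  split_ifs with h
  · rw [pvGetD_replicate]; split_ifs <;> rfl
  · rfl

lemma pvAdjEntry (k mask : Int) (kn : Nat) (hk : 1 ≤ k) (hkn : kn = k.toNat) (p q : Nat) :
    pvEnt ((List.range (kn-1)).foldl
        (fun (st : List (List Int) × Nat) i =>
          (List.range' (i+1) (kn-(i+1))).foldl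
            (fun (st2 : List (List Int) × Nat) j =>
              ((if pvBit mask st2.2 then st2.1.set i ((st2.1.getD i []).set j 1) else st2.1), st2.2 + 1))
            st)
        (List.replicate kn (List.replicate kn (0:Int)), 0)).1 p q
      = if p < q ∧ q < kn ∧ pvEdgeB k mask p q = true then 1 else 0 := by
  have hn : 1 ≤ kn := by omega
  have hrow : ∀ p, p < kn → ((List.replicate kn (List.replicate kn (0:Int))).getD p []).length = kn := by
    intro p hp
    rw [List.getD_eq_getElem?_getD, List.getElem?_replicate, if_pos hp, Option.getD_some,
      List.length_replicate]
  have hmain := pvAdjOuter mask kn (kn-1) 0 (List.replicate kn (List.replicate kn (0:Int)))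
    (List.length_replicate) hrow (by omega) hn p q
  rw [show pvS kn 0 = 0 from rfl] at hmain
  rw [← List.range_eq_range'] at hmain
  rw [hmain, pvEnt_init]
  by_cases hpq : p < q ∧ q < kn
  · rw [pvEdgeB_eq k mask kn p q hk hkn hpq.1 hpq.2]
    by_cases hb : pvBit mask (pvS kn p + (q - p - 1)) = true
    · rw [if_pos ⟨by omega, by omega, hpq.1, hpq.2, hb⟩, if_pos ⟨hpq.1, hpq.2, hb⟩]
    · rw [if_neg (fun h => hb h.2.2.2.2), if_neg (fun h => hb h.2.2)]
  · rw [if_neg (fun h => hpq ⟨h.2.2.1, h.2.2.2.1⟩), if_neg (fun h => hpq ⟨h.1, h.2.1⟩)]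

lemma pvODInner (c : Nat → Bool) (i : Nat) :
    ∀ (L : List Nat) (od : List Int), i < od.length →
    ((L.foldl (fun (od : List Int) j => if c j then od.set i (od.getD i 0 + 1) else od) od).length
        = od.length ∧
     ∀ p : Nat, (L.foldl (fun (od : List Int) j => if c j then od.set i (od.getD i 0 + 1) else od) od).getD p 0
        = if p = i then od.getD i 0 + (L.countP c : Int) else od.getD p 0) := by
  intro L
  induction L with
  | nil =>
      intro od hi
      refine ⟨rfl, fun p => ?_⟩
      split_ifs with h
      · rw [h]; simp
      · rfl
  | cons j L ih =>
      intro od hi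
      rw [List.foldl_cons]
      by_cases hc : c j = true
      · rw [if_pos hc]
        obtain ⟨hlen, hent⟩ := ih (od.set i (od.getD i 0 + 1)) (by simpa using hi)
        refine ⟨by rw [hlen]; simp, fun p => ?_⟩
        rw [hent p]
        split_ifs with h
        · rw [pvGetD_set_self _ _ _ _ hi]
          have hcnt : (List.countP c (j :: L)) = List.countP c L + 1 := by
            rw [List.countP_cons, if_pos hc]
          rw [hcnt]
          push_cast
          ring
        · rw [pvGetD_set_ne _ _ _ _ _ h]
      · rw [if_neg hc]
        obtain ⟨hlen, hent⟩ := ih od hi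
        refine ⟨hlen, fun p => ?_⟩
        rw [hent p]
        have : (List.countP c (j :: L)) = List.countP c L := by
          rw [List.countP_cons, if_neg hc]; omega
        rw [this]

lemma pvODOuter (c : Nat → Nat → Bool) (n : Nat) :
    ∀ (M : List Nat) (od : List Int), od.length = n → (∀ i ∈ M, i < n) → M.Nodup →
    ((M.foldl (fun od i => (List.range n).foldl
        (fun (od : List Int) j => if c i j then od.set i (od.getD i 0 + 1) else od) od) od).length = n ∧
     ∀ p : Nat, (M.foldl (fun od i => (List.range n).foldl
        (fun (od : List Int) j => if c i j then od.set i (od.getD i 0 + 1) else od) od) od).getD p 0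
        = if p ∈ M then od.getD p 0 + ((List.range n).countP (c p) : Int) else od.getD p 0) := by
  intro M
  induction M with
  | nil =>
      intro od hlen _ _
      refine ⟨hlen, fun p => ?_⟩
      rw [List.foldl_nil, if_neg List.not_mem_nil]
  | cons i M ih =>
      intro od hlen hmem hnd
      rw [List.foldl_cons]
      obtain ⟨hlen1, hent1⟩ := pvODInner (c i) i (List.range n) od (by rw [hlen]; exact hmem i (by simp))
      obtain ⟨hlen2, hent2⟩ := ih ((List.range n).foldl
          (fun (od : List Int) j => if c i j then od.set i (od.getD i 0 + 1) else od) od)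
        (by rw [hlen1, hlen]) (fun x hx => hmem x (by simp [hx])) hnd.of_cons
      refine ⟨hlen2, fun p => ?_⟩
      rw [hent2 p, hent1 p]
      by_cases hpi : p = i
      · subst hpi
        have hpM : p ∉ M := (List.nodup_cons.mp hnd).1
        rw [if_neg hpM, if_pos rfl, if_pos (by simp)]
      · by_cases hpM : p ∈ M
        · rw [if_pos hpM, if_neg hpi, if_pos (by simp [hpM])]
        · rw [if_neg hpM, if_neg hpi, if_neg (by simp [hpi, hpM])]

lemma pvGuard_eq (k mask : Int) (kn : Nat) (adj : List (List Int)) (hk : 1 ≤ k) (hkn : kn = k.toNat)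
    (hadj : ∀ p q : Nat, pvEnt adj p q = if p < q ∧ q < kn ∧ pvEdgeB k mask p q = true then 1 else 0) :
    ((List.range (kn-1)).any (fun node =>
      ((List.range kn).foldl (fun od i => (List.range kn).foldl
          (fun (od : List Int) j => if (adj.getD i []).getD j 0 == 1 then od.set i (od.getD i 0 + 1) else od) od)
        (List.replicate kn (0:Int))).getD node 0 == 0))
    = ((List.range (kn-1)).any (fun i => !((List.range' (i+1) (kn-(i+1))).any (fun j => pvEdgeB k mask i j)))) := by
  obtain ⟨_, hent⟩ := pvODOuter (fun i j => (adj.getD i []).getD j 0 == 1) kn (List.range kn)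
    (List.replicate kn 0) (by simp) (by simp) (List.nodup_range)
  have hout : ∀ node : Nat, node < kn →
      ((List.range kn).foldl (fun od i => (List.range kn).foldl
          (fun (od : List Int) j => if (adj.getD i []).getD j 0 == 1 then od.set i (od.getD i 0 + 1) else od) od)
        (List.replicate kn (0:Int))).getD node 0
        = ((List.range kn).countP (fun j => (adj.getD node []).getD j 0 == 1) : Int) := by
    intro node hnode
    rw [hent node, if_pos (List.mem_range.mpr hnode), pvGetD_replicate, if_pos hnode, zero_add]
  have hcnt0 : ∀ node : Nat,
      (((List.range kn).countP (fun j => (adj.getD node []).getD j 0 == 1)) = 0 ↔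
        ¬ ∃ j, node < j ∧ j < kn ∧ pvEdgeB k mask node j = true) := by
    intro node
    rw [List.countP_eq_zero]
    constructor
    · rintro h ⟨j, hj1, hj2, hj3⟩
      have hj := h j (List.mem_range.mpr hj2)
      rw [show ((adj.getD node []).getD j 0) = pvEnt adj node j from rfl, hadj node j,
        if_pos ⟨hj1, hj2, hj3⟩] at hj
      simp at hj
    · intro h j hj
      rw [show ((adj.getD node []).getD j 0) = pvEnt adj node j from rfl, hadj node j]
      split_ifs with hc
      · exact absurd ⟨j, hc.1, hc.2.1, hc.2.2⟩ h
      · simp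
  rw [Bool.eq_iff_iff]
  constructor
  · intro hA
    obtain ⟨node, hmem, hval⟩ := List.any_eq_true.mp hA
    have hnode := List.mem_range.mp hmem
    rw [hout node (by omega)] at hval
    rw [beq_iff_eq] at hval
    have h0 : ((List.range kn).countP (fun j => (adj.getD node []).getD j 0 == 1)) = 0 := by
      exact_mod_cast hval
    have hno := (hcnt0 node).mp h0
    refine List.any_eq_true.mpr ⟨node, hmem, ?_⟩
    rw [Bool.not_eq_true', List.any_eq_false]
    intro j hj
    have hj' := List.mem_range'_1.mp hj
    intro hE
    exact hno ⟨j, by omega, by omega, hE⟩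
  · intro hB
    obtain ⟨node, hmem, hval⟩ := List.any_eq_true.mp hB
    have hnode := List.mem_range.mp hmem
    rw [Bool.not_eq_true', List.any_eq_false] at hval
    refine List.any_eq_true.mpr ⟨node, hmem, ?_⟩
    rw [hout node (by omega)]
    have h0 : ((List.range kn).countP (fun j => (adj.getD node []).getD j 0 == 1)) = 0 := by
      refine (hcnt0 node).mpr ?_
      rintro ⟨j, h1, h2, h3⟩
      exact hval j (List.mem_range'_1.mpr ⟨by omega, by omega⟩) h3
    rw [h0]
    rfl

lemma pvAny_congr (l : List Nat) (f g : Nat → Bool) (h : ∀ x ∈ l, f x = g x) :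
    l.any f = l.any g := by
  induction l with
  | nil => rfl
  | cons a t ih =>
      rw [List.any_cons, List.any_cons, h a (by simp), ih (fun x hx => h x (by simp [hx]))]

lemma pvDpStab (k mask : Int) (kn : Nat) :
    ∀ (t : Nat) (r : List Bool),
    (((List.range t).reverse.foldl (fun (r : List Bool) i =>
        r.set i ((List.range' (i+1) (kn-(i+1))).any (fun j => pvEdgeB k mask i j && r.getD j false))) r).length
      = r.length) ∧
    (∀ p, t ≤ p → ((List.range t).reverse.foldl (fun (r : List Bool) i =>
        r.set i ((List.range' (i+1) (kn-(i+1))).any (fun j => pvEdgeB k mask i j && r.getD j false))) r).getD p false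
      = r.getD p false) := by
  intro t
  induction t with
  | zero => intro r; exact ⟨rfl, fun p _ => rfl⟩
  | succ t ih =>
      intro r
      have hsplit : (List.range (t+1)).reverse = t :: (List.range t).reverse := by
        rw [List.range_succ, List.reverse_append]; rfl
      rw [hsplit, List.foldl_cons]
      obtain ⟨ihl, ihe⟩ := ih (r.set t ((List.range' (t+1) (kn-(t+1))).any
        (fun j => pvEdgeB k mask t j && r.getD j false)))
      refine ⟨by rw [ihl, List.length_set], fun p hp => ?_⟩
      rw [ihe p (by omega), pvGetD_set_ne _ _ _ _ _ (by omega)]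

lemma pvDpRec (k mask : Int) (kn : Nat) :
    ∀ (t : Nat), t ≤ kn → ∀ (r : List Bool), r.length = kn → ∀ i, i < t →
    ((List.range t).reverse.foldl (fun (r : List Bool) i =>
        r.set i ((List.range' (i+1) (kn-(i+1))).any (fun j => pvEdgeB k mask i j && r.getD j false))) r).getD i false
      = (List.range' (i+1) (kn-(i+1))).any (fun j => pvEdgeB k mask i j &&
          ((List.range t).reverse.foldl (fun (r : List Bool) i =>
            r.set i ((List.range' (i+1) (kn-(i+1))).any (fun j => pvEdgeB k mask i j && r.getD j false))) r).getD j false) := by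
  intro t
  induction t with
  | zero => intro _ r _ i hi; omega
  | succ t ih =>
      intro ht r hr i hi
      have hsplit : (List.range (t+1)).reverse = t :: (List.range t).reverse := by
        rw [List.range_succ, List.reverse_append]; rfl
      rw [hsplit, List.foldl_cons]
      set r1 := r.set t ((List.range' (t+1) (kn-(t+1))).any
        (fun j => pvEdgeB k mask t j && r.getD j false)) with hr1
      have hr1len : r1.length = kn := by rw [hr1, List.length_set, hr]
      by_cases hit : i = t
      · subst hit
        obtain ⟨_, hstab⟩ := pvDpStab k mask kn i r1
        rw [hstab i (by omega)]
        rw [hr1, pvGetD_set_self _ _ _ _ (by omega)]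
        apply pvAny_congr
        intro j hj
        have hj' := List.mem_range'_1.mp hj
        rw [hstab j (by omega), hr1, pvGetD_set_ne _ _ _ _ _ (by omega)]
      · exact ih (by omega) r1 hr1len i (by omega)

lemma pvCF_set : ∀ (r : List Bool) (s : Nat), s < r.length → r.getD s false = false →
    pvCF (r.set s true) + 1 = pvCF r := by
  intro r
  induction r with
  | nil => intro s hs _; simp at hs
  | cons a t ih =>
      intro s hs hval
      cases s with
      | zero =>
          have ha : a = false := hval
          subst ha
          simp [pvCF, List.count_cons]
      | succ s =>
          have hval' : t.getD s false = false := hval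
          have hs' : s < t.length := by simpa using hs
          have := ih s hs' hval'
          simp only [List.set_cons_succ, pvCF, List.count_cons] at *
          omega

-- one step of A's inner BFS loop, abstracted over the edge test P
def pvStep (P : Nat → Bool) (st : List Bool × List Nat) (prev : Nat) : List Bool × List Nat :=
  if P prev && !(st.1.getD prev false) then (st.1.set prev true, st.2 ++ [prev]) else st

lemma pvBfsInner (P : Nat → Bool) :
    ∀ (c s : Nat) (r : List Bool) (q : List Nat), s + c ≤ r.length →
    ∃ new : List Nat,
      ((List.range' s c).foldl (pvStep P) (r, q)).1.length = r.length ∧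
      ((List.range' s c).foldl (pvStep P) (r, q)).2 = q ++ new ∧
      (∀ p, (p < s ∨ s + c ≤ p) →
        ((List.range' s c).foldl (pvStep P) (r, q)).1.getD p false = r.getD p false) ∧
      (∀ p, s ≤ p → p < s + c →
        ((List.range' s c).foldl (pvStep P) (r, q)).1.getD p false = (r.getD p false || P p)) ∧
      (∀ x ∈ new, s ≤ x ∧ x < s + c ∧ P x = true ∧ r.getD x false = false) ∧
      (∀ x, s ≤ x → x < s + c → P x = true → r.getD x false = false → x ∈ new) ∧
      pvCF ((List.range' s c).foldl (pvStep P) (r, q)).1 + new.length = pvCF r := by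
  intro c
  induction c with
  | zero =>
      intro s r q hsc
      refine ⟨[], rfl, by simp, fun p _ => rfl, fun p h1 h2 => by omega, by simp, fun x h1 h2 => by omega, by simp⟩
  | succ c ih =>
      intro s r q hsc
      rw [List.range'_succ, List.foldl_cons]
      have hstep : pvStep P (r, q) s =
          if P s && !(r.getD s false) then (r.set s true, q ++ [s]) else (r, q) := rfl
      by_cases hcond : (P s && !(r.getD s false)) = true
      · have hcond' : P s = true ∧ r.getD s false = false := by simpa using hcond
        have hPs : P s = true := hcond'.1
        have hrs : r.getD s false = false := hcond'.2
        rw [hstep, if_pos hcond]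
        obtain ⟨new', hl, hq2, hout, hin, hmemF, hmemC, hcf⟩ :=
          ih (s+1) (r.set s true) (q ++ [s]) (by rw [List.length_set]; omega)
        refine ⟨s :: new', by rw [hl, List.length_set], ?_, ?_, ?_, ?_, ?_, ?_⟩
        · rw [hq2, List.append_assoc, List.singleton_append]
        · intro p hp
          rw [hout p (by omega), pvGetD_set_ne _ _ _ _ _ (by omega)]
        · intro p hp1 hp2
          by_cases hps : p = s
          · subst hps
            rw [hout p (by omega), pvGetD_set_self _ _ _ _ (by omega), hPs, hrs]
            rfl
          · rw [hin p (by omega) (by omega), pvGetD_set_ne _ _ _ _ _ hps]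
        · intro x hx
          rcases List.mem_cons.mp hx with hxs | hx'
          · exact ⟨by omega, by omega, by rw [hxs]; exact hPs, by rw [hxs]; exact hrs⟩
          · obtain ⟨h1, h2, h3, h4⟩ := hmemF x hx'
            rw [pvGetD_set_ne _ _ _ _ _ (by omega)] at h4
            exact ⟨by omega, by omega, h3, h4⟩
        · intro x h1 h2 h3 h4
          by_cases hxs : x = s
          · simp [hxs]
          · have hx' : x ∈ new' := hmemC x (by omega) (by omega) h3
              (by rw [pvGetD_set_ne _ _ _ _ _ hxs]; exact h4)
            exact List.mem_cons_of_mem _ hx'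
        · have hset := pvCF_set r s (by omega) hrs
          simp only [List.length_cons]
          omega
      · rw [hstep, if_neg hcond]
        obtain ⟨new', hl, hq2, hout, hin, hmemF, hmemC, hcf⟩ := ih (s+1) r q (by omega)
        refine ⟨new', hl, hq2, ?_, ?_, ?_, ?_, hcf⟩
        · intro p hp
          exact hout p (by omega)
        · intro p hp1 hp2
          by_cases hps : p = s
          · subst hps
            rw [hout p (by omega)]
            by_cases hP : P p = true
            · have hrt : r.getD p false = true := by
                cases hr : r.getD p false
                · exfalso; apply hcond; rw [hP, hr]; rfl
                · rfl
              rw [hrt, hP]; rfl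
            · have hP' : P p = false := by revert hP; cases P p <;> simp
              rw [hP', Bool.or_false]
          · exact hin p (by omega) (by omega)
        · intro x hx
          obtain ⟨h1, h2, h3, h4⟩ := hmemF x hx
          exact ⟨by omega, by omega, h3, h4⟩
        · intro x h1 h2 h3 h4
          by_cases hxs : x = s
          · exfalso; apply hcond; rw [← hxs, h3, h4]; rfl
          · exact hmemC x (by omega) (by omega) h3 h4

lemma pvBfsA_nil (adj : List (List Int)) (fuel : Nat) (r : List Bool) :
    pvBfsA adj fuel r [] = r := by
  cases fuel <;> rfl

lemma pvBfsA_succ (adj : List (List Int)) (fuel : Nat) (r : List Bool) (cur : Nat) (q' : List Nat) :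
    pvBfsA adj (fuel+1) r (cur :: q') = pvBfsA adj fuel
      ((List.range cur).foldl (pvStep (fun prev => (adj.getD prev []).getD cur 0 == 1)) (r, q')).1
      ((List.range cur).foldl (pvStep (fun prev => (adj.getD prev []).getD cur 0 == 1)) (r, q')).2 := rfl

lemma pvBfsRun (adj : List (List Int)) (kn : Nat) (E : Nat → Nat → Bool) (dp : List Bool)
    (hkn : 1 ≤ kn)
    (hadj : ∀ p c : Nat, ((adj.getD p []).getD c 0 == 1) = (decide (p < c) && (decide (c < kn) && E p c)))
    (hdpc : ∀ i j, i < j → j < kn → E i j = true → dp.getD j false = true → dp.getD i false = true) :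
    ∀ (fuel : Nat) (r : List Bool) (q : List Nat),
    r.length = kn →
    (∀ x ∈ q, x < kn ∧ r.getD x false = true) →
    (∀ i, i < kn → r.getD i false = true → dp.getD i false = true) →
    (∀ i c, i < c → c < kn → E i c = true → r.getD c false = true → c ∉ q → r.getD i false = true) →
    r.getD (kn-1) false = true →
    kn * pvCF r + q.length ≤ fuel →
    ∃ rf, pvBfsA adj fuel r q = rf ∧ rf.length = kn ∧
      (∀ i, i < kn → rf.getD i false = true → dp.getD i false = true) ∧
      (∀ i c, i < c → c < kn → E i c = true → rf.getD c false = true → rf.getD i false = true) ∧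
      rf.getD (kn-1) false = true := by
  intro fuel
  induction fuel using Nat.strong_induction_on with
  | _ fuel ih =>
    intro r q hr hq hsound hclosed hsink hmeas
    cases q with
    | nil =>
        refine ⟨r, pvBfsA_nil adj fuel r, hr, hsound, ?_, hsink⟩
        intro i c h1 h2 h3 h4
        exact hclosed i c h1 h2 h3 h4 (List.not_mem_nil)
    | cons cur q' =>
        cases fuel with
        | zero =>
            exfalso
            rw [List.length_cons] at hmeas
            omega
        | succ fuel =>
            have hcur := hq cur (by simp)
            set P := fun prev => ((adj.getD prev []).getD cur 0 == 1) with hPdef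
            have hP : ∀ prev, P prev = true ↔ (prev < cur ∧ E prev cur = true) := by
              intro prev
              rw [hPdef]
              show ((adj.getD prev []).getD cur 0 == 1) = true ↔ _
              rw [hadj prev cur]
              simp [hcur.1]
            have H := pvBfsInner P cur 0 r q' (by omega)
            rw [← List.range_eq_range'] at H
            obtain ⟨new, hl, hq2, hout, hin, hmemF, hmemC, hcf⟩ := H
            rw [pvBfsA_succ]
            set R2 := ((List.range cur).foldl (pvStep P) (r, q')).1 with hR2
            set Q2 := ((List.range cur).foldl (pvStep P) (r, q')).2 with hQ2
            have hmono : ∀ p, r.getD p false = true → R2.getD p false = true := by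
              intro p hp
              by_cases hpc : p < cur
              · rw [hin p (by omega) (by omega), hp]; rfl
              · rw [hout p (by omega)]; exact hp
            have hq2' : ∀ x ∈ Q2, x < kn ∧ R2.getD x false = true := by
              intro x hx
              rw [hq2] at hx
              rcases List.mem_append.mp hx with hx' | hx'
              · have := hq x (by simp [hx'])
                exact ⟨this.1, hmono x this.2⟩
              · obtain ⟨_, h2, h3, h4⟩ := hmemF x hx'
                refine ⟨by omega, ?_⟩
                rw [hin x (by omega) (by omega), h3, Bool.or_true]
            have hsound2 : ∀ i, i < kn → R2.getD i false = true → dp.getD i false = true := by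
              intro i hik hRi
              by_cases hic : i < cur
              · rw [hin i (by omega) (by omega)] at hRi
                rcases (by simpa using hRi : r.getD i false = true ∨ P i = true) with hri | hPi
                · exact hsound i hik hri
                · have hE := ((hP i).mp hPi).2
                  exact hdpc i cur hic hcur.1 hE (hsound cur hcur.1 hcur.2)
              · rw [hout i (by omega)] at hRi
                exact hsound i hik hRi
            have hclosed2 : ∀ i c2, i < c2 → c2 < kn → E i c2 = true →
                R2.getD c2 false = true → c2 ∉ Q2 → R2.getD i false = true := by
              intro i c2 h1 h2 h3 h4 h5
              by_cases hc2cur : c2 = cur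
              · subst hc2cur
                rw [hin i (by omega) (by omega)]
                rw [(hP i).mpr ⟨h1, h3⟩, Bool.or_true]
              · rw [hq2] at h5
                have hc2q' : c2 ∉ q' := fun hm => h5 (List.mem_append.mpr (Or.inl hm))
                have hc2new : c2 ∉ new := fun hm => h5 (List.mem_append.mpr (Or.inr hm))
                have hrc2 : r.getD c2 false = true := by
                  by_cases hlt : c2 < cur
                  · cases hr2 : r.getD c2 false
                    · exfalso
                      rw [hin c2 (by omega) (by omega), hr2, Bool.false_or] at h4
                      exact hc2new (hmemC c2 (by omega) (by omega) h4 hr2)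
                    · rfl
                  · rw [hout c2 (by omega)] at h4; exact h4
                have hri : r.getD i false = true := by
                  refine hclosed i c2 h1 h2 h3 hrc2 ?_
                  intro hm
                  rcases List.mem_cons.mp hm with hm' | hm'
                  · exact hc2cur hm'
                  · exact hc2q' hm'
                exact hmono i hri
            have hsink2 : R2.getD (kn-1) false = true := hmono _ hsink
            have hmeas2 : kn * pvCF R2 + Q2.length ≤ fuel := by
              have hq2len : Q2.length = q'.length + new.length := by
                rw [hq2, List.length_append]
              have h1 : kn * pvCF r = kn * pvCF R2 + kn * new.length := by
                rw [← hcf, Nat.mul_add]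
              have h2 : new.length ≤ kn * new.length := Nat.le_mul_of_pos_left _ (by omega)
              rw [List.length_cons] at hmeas
              omega
            exact ih fuel (by omega) R2 Q2 (hl.trans hr) hq2' hsound2 hclosed2 hsink2 hmeas2

lemma pvComplete (kn : Nat) (E : Nat → Nat → Bool) (dp rf : List Bool)
    (hdpe : ∀ i, i < kn - 1 → dp.getD i false = true →
      ∃ j, i < j ∧ j < kn ∧ E i j = true ∧ dp.getD j false = true)
    (hrfc : ∀ i c, i < c → c < kn → E i c = true → rf.getD c false = true → rf.getD i false = true)
    (hrfs : rf.getD (kn-1) false = true) :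
    ∀ d i, i < kn → kn - i ≤ d → dp.getD i false = true → rf.getD i false = true := by
  intro d
  induction d with
  | zero => intro i h1 h2 _; omega
  | succ d ih =>
      intro i h1 h2 hdp
      by_cases hi : i = kn - 1
      · rw [hi]; exact hrfs
      · obtain ⟨j, hj1, hj2, hj3, hj4⟩ := hdpe i (by omega) hdp
        have hrfj := ih j hj2 (by omega) hj4
        exact hrfc i j hj1 hj2 hj3 hrfj

lemma pvAll_iff (l : List Bool) : l.all id = true ↔ ∀ i, i < l.length → l.getD i false = true := by
  rw [List.all_eq_true]
  constructor
  · intro h i hi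
    have := h l[i] (List.getElem_mem hi)
    rw [List.getD_eq_getElem?_getD, List.getElem?_eq_getElem hi]
    exact this
  · intro h x hx
    obtain ⟨i, hi, hval⟩ := List.mem_iff_getElem.mp hx
    have := h i hi
    rw [List.getD_eq_getElem?_getD, List.getElem?_eq_getElem hi] at this
    rw [← hval]
    exact this

lemma pvAllEq (r1 r2 : List Bool) (n : Nat) (h1 : r1.length = n) (h2 : r2.length = n)
    (h : ∀ i, i < n → r1.getD i false = r2.getD i false) : r1.all id = r2.all id := by
  rw [Bool.eq_iff_iff, pvAll_iff, pvAll_iff, h1, h2]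
  constructor
  · intro hh i hi; rw [← h i hi]; exact hh i hi
  · intro hh i hi; rw [h i hi]; exact hh i hi

lemma pvMain (k mask : Int) (kn : Nat) (adj : List (List Int))
    (hk : 1 ≤ k) (hkn : kn = k.toNat)
    (hadjE : ∀ p q : Nat, pvEnt adj p q = if p < q ∧ q < kn ∧ pvEdgeB k mask p q = true then 1 else 0) :
    (pvBfsA adj (kn*kn) ((List.replicate kn false).set (kn-1) true) [kn-1]).all id
      = ((List.range (kn-1)).reverse.foldl
          (fun (r : List Bool) i => r.set i ((List.range' (i+1) (kn-(i+1))).any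
            (fun j => pvEdgeB k mask i j && r.getD j false)))
          ((List.replicate kn false).set (kn-1) true)).all id := by
  have hkn1 : 1 ≤ kn := by omega
  have hr0len : ((List.replicate kn false).set (kn-1) true).length = kn := by simp
  obtain ⟨hstabLen, hstabGet⟩ :=
    pvDpStab k mask kn (kn-1) ((List.replicate kn false).set (kn-1) true)
  have hrec := pvDpRec k mask kn (kn-1) (by omega) ((List.replicate kn false).set (kn-1) true) hr0len
  set dp := (List.range (kn-1)).reverse.foldl
      (fun (r : List Bool) i => r.set i ((List.range' (i+1) (kn-(i+1))).any
        (fun j => pvEdgeB k mask i j && r.getD j false)))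
      ((List.replicate kn false).set (kn-1) true) with hdpdef
  have hdpLen : dp.length = kn := hstabLen.trans hr0len
  have hr0get : ∀ x : Nat, ((List.replicate kn false).set (kn-1) true).getD x false
      = decide (x = kn-1) := by
    intro x
    by_cases hx : x = kn - 1
    · rw [hx, pvGetD_set_self _ _ _ _ (by simp; omega)]
      simp
    · rw [pvGetD_set_ne _ _ _ _ _ hx, pvGetD_replicate]
      split_ifs <;> simp [hx]
  have hdpSink : dp.getD (kn-1) false = true := by
    rw [hstabGet (kn-1) (Nat.le_refl _), hr0get]
    simp
  have hdpc : ∀ i j, i < j → j < kn → pvEdgeB k mask i j = true →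
      dp.getD j false = true → dp.getD i false = true := by
    intro i j h1 h2 h3 h4
    rw [hrec i (by omega)]
    exact List.any_eq_true.mpr ⟨j, List.mem_range'_1.mpr ⟨by omega, by omega⟩, by rw [h3, h4]; rfl⟩
  have hdpe : ∀ i, i < kn - 1 → dp.getD i false = true →
      ∃ j, i < j ∧ j < kn ∧ pvEdgeB k mask i j = true ∧ dp.getD j false = true := by
    intro i hi h
    rw [hrec i hi] at h
    obtain ⟨j, hjm, hjv⟩ := List.any_eq_true.mp h
    have hjb := List.mem_range'_1.mp hjm
    rcases (by simpa using hjv : pvEdgeB k mask i j = true ∧ dp.getD j false = true) with ⟨e1, e2⟩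
    exact ⟨j, by omega, by omega, e1, e2⟩
  have hadj : ∀ p c : Nat, ((adj.getD p []).getD c 0 == 1)
      = (decide (p < c) && (decide (c < kn) && pvEdgeB k mask p c)) := by
    intro p c
    rw [show (adj.getD p []).getD c 0 = pvEnt adj p c from rfl, hadjE p c]
    by_cases h1 : p < c
    · by_cases h2 : c < kn
      · cases h3 : pvEdgeB k mask p c
        · rw [if_neg (fun h => by simp at h)]
          simp [h1, h2, h3]
        · rw [if_pos ⟨h1, h2, rfl⟩]
          simp [h1, h2, h3]
      · rw [if_neg (fun h => h2 h.2.1)]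
        simp [h2]
    · rw [if_neg (fun h => h1 h.1)]
      simp [h1]
  have hq0 : ∀ x ∈ ([kn-1] : List Nat), x < kn ∧
      ((List.replicate kn false).set (kn-1) true).getD x false = true := by
    intro x hx
    have hx' : x = kn - 1 := by simpa using hx
    refine ⟨by omega, ?_⟩
    rw [hx', hr0get]
    simp
  have hsound0 : ∀ i, i < kn → ((List.replicate kn false).set (kn-1) true).getD i false = true →
      dp.getD i false = true := by
    intro i hi h
    rw [hr0get i] at h
    have hieq : i = kn - 1 := by simpa using h
    rw [hieq]
    exact hdpSink
  have hclosed0 : ∀ i c, i < c → c < kn → pvEdgeB k mask i c = true →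
      ((List.replicate kn false).set (kn-1) true).getD c false = true →
      c ∉ ([kn-1] : List Nat) →
      ((List.replicate kn false).set (kn-1) true).getD i false = true := by
    intro i c h1 h2 h3 h4 h5
    exfalso
    rw [hr0get c] at h4
    have hceq : c = kn - 1 := by simpa using h4
    exact h5 (by simp [hceq])
  have hsink0 : ((List.replicate kn false).set (kn-1) true).getD (kn-1) false = true := by
    rw [hr0get]; simp
  have hcf0 : pvCF ((List.replicate kn false).set (kn-1) true) + 1 = kn := by
    have h := pvCF_set (List.replicate kn false) (kn-1) (by simp; omega)
      (by rw [pvGetD_replicate]; split_ifs <;> rfl)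
    have h2 : pvCF (List.replicate kn false) = kn := by simp [pvCF]
    omega
  have hmeas0 : kn * pvCF ((List.replicate kn false).set (kn-1) true)
      + ([kn-1] : List Nat).length ≤ kn*kn := by
    obtain ⟨m, hm⟩ : ∃ m, kn = m + 1 := ⟨kn - 1, by omega⟩
    have hsq : kn * kn = kn * (kn - 1) + kn := by
      rw [hm]
      have : (m+1) * (m+1) = (m+1) * m + (m+1) := by ring
      simpa using this
    have hcc : pvCF ((List.replicate kn false).set (kn-1) true) = kn - 1 := by omega
    simp only [List.length_cons, List.length_nil]
    rw [hcc]
    omega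
  obtain ⟨rf, hrfeq, hrflen, hrfsound, hrfclosed, hrfsink⟩ :=
    pvBfsRun adj kn (pvEdgeB k mask) dp hkn1 hadj hdpc (kn*kn)
      ((List.replicate kn false).set (kn-1) true) [kn-1] hr0len hq0 hsound0 hclosed0 hsink0 hmeas0
  rw [hrfeq]
  apply pvAllEq rf dp kn hrflen hdpLen
  intro i hi
  rw [Bool.eq_iff_iff]
  constructor
  · intro h
    exact hrfsound i hi h
  · intro h
    exact pvComplete kn (pvEdgeB k mask) dp rf hdpe hrfclosed hrfsink kn i hi (by omega) h

-- ===== VERDICT (by name: the statement is the Claim_ definition above) =====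
theorem is_valid_dag_spec : Claim_equal_is_valid_dag := by
  intro k mask _ hpre
  have hk : 1 ≤ k := hpre
  unfold Spec_is_valid_dag is_valid_dag is_valid_dag_alt
  by_cases hg1 : k > 1 ∧ mask = 0
  · rw [if_pos hg1, if_pos hg1]
  · rw [if_neg hg1, if_neg hg1, if_neg (by omega : ¬ k ≤ 0), if_neg (by omega : ¬ k ≤ 0)]
    dsimp only
    set kn := k.toNat with hkn
    have hkn1 : 1 ≤ kn := by omega
    rw [pvGuard_eq k mask kn _ hk hkn (pvAdjEntry k mask kn hk hkn)]
    split_ifs with hg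
    · rfl
    · exact pvMain k mask kn _ hk hkn (pvAdjEntry k mask kn hk hkn)
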